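-- pv_equiv track=rewrite | github.com/botij0/katas | python/password-creator/main.py | check_pair_letters
-- ===== SOURCE A (Python) =====
-- def check_pair_letters(s: str) -> bool:
--     pair_count = 0
--     last_pair = ""
--     for i in range(0, len(s) - 1):
--         if s[i] == s[i + 1] and s[i] != last_pair:
--             pair_count += 1
--             last_pair = s[i]
--
--         if pair_count >= 2:
--             return True
--
--     return False
-- ===== SOURCE B (Python) =====
-- def check_pair_letters(s: str) -> bool:
--     # pair-letter sequence: the left letter of every adjacent equal pair
--     letters = [a for a, b in zip(s, s[1:]) if a == b]
--     # number of groups after collapsing consecutive equal pair-letters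
--     groups = (1 if letters else 0) + sum(1 for x, y in zip(letters, letters[1:]) if x != y)
--     return groups >= 2
-- ===== Notes on version B (the rewrite author's own statement) =====
-- stated objective: alternative
-- what changed: Replaces the stateful index loop (pair_count/last_pair accumulators with early return) by a two-phase declarative pass: build the pair-letter sequence with zip, then count its collapsed groups by comparing adjacent elements.
import Mathlib
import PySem

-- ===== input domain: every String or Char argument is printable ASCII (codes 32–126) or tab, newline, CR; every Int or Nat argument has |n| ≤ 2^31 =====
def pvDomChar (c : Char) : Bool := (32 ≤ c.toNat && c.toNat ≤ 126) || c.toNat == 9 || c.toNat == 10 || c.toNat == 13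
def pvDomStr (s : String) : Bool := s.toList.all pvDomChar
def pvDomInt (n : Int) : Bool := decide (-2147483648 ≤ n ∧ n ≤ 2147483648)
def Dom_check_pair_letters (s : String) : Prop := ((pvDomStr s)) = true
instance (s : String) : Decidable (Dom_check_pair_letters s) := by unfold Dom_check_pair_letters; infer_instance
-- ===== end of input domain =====

-- B replaces A's stateful index scan (pair_count/last_pair accumulators with early return)
-- by a declarative two-phase pass: build the pair-letter sequence, then count its collapsed
-- groups by comparing adjacent elements (objective: alternative decomposition, same cost).

-- ===== PORT A =====
-- A's last_pair is always "" or a single-character string; ported as Option Char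
-- (none = "", some c = the one-char string), with identical comparison behaviour.
def check_pair_letters_loop (cs : List Char) : List Int → Int → Option Char → Bool
  | [], _, _ => false
  | i :: rest, pair_count, last_pair =>
    match PySem.List.pyGet? cs i, PySem.List.pyGet? cs (i + 1) with
    | some a, some b =>
      let pc := if a = b ∧ some a ≠ last_pair then pair_count + 1 else pair_count
      let lp := if a = b ∧ some a ≠ last_pair then some a else last_pair
      if pc ≥ 2 then true else check_pair_letters_loop cs rest pc lp
    | _, _ => false  -- unreachable: every index the loop visits is in range

def check_pair_letters (s : String) : Bool :=
  check_pair_letters_loop s.toList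
    (PySem.List.pyRange 0 ((s.toList.length : Int) - 1) 1) 0 none

-- ===== PORT B =====
-- letters = [a for a, b in zip(s, s[1:]) if a == b]
def pvPairLetters (cs : List Char) : List Char :=
  (cs.zip cs.tail).filterMap (fun p => if p.1 = p.2 then some p.1 else none)

def check_pair_letters_alt (s : String) : Bool :=
  let letters := pvPairLetters s.toList
  let groups : Int := (if letters = [] then 0 else 1) +
    ((letters.zip letters.tail).filter (fun p => p.1 ≠ p.2)).length
  decide (groups ≥ 2)

-- ===== PRECONDITION & SPEC =====
def Spec_check_pair_letters (s : String) (out : Bool) : Prop := out = check_pair_letters_alt s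
instance (s : String) (out : Bool) : Decidable (Spec_check_pair_letters s out) := by unfold Spec_check_pair_letters; infer_instance

-- ===== CLAIM (what is proved, stated in full; the proofs are below) =====
def Claim_equal_check_pair_letters : Prop := ∀ (s : String), Dom_check_pair_letters s → Spec_check_pair_letters s (check_pair_letters s)

-- ===== LEMMAS AND PROOFS =====

-- A's loop body re-expressed structurally over the list of adjacent pairs
def pvAuxA : List (Char × Char) → Int → Option Char → Bool
  | [], _, _ => false
  | (a, b) :: rest, pair_count, last_pair =>
    let pc := if a = b ∧ some a ≠ last_pair then pair_count + 1 else pair_count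
    let lp := if a = b ∧ some a ≠ last_pair then some a else last_pair
    if pc ≥ 2 then true else pvAuxA rest pc lp

-- the same loop over the pair-letter sequence only
def pvAuxB : List Char → Int → Option Char → Bool
  | [], _, _ => false
  | c :: rest, pair_count, last_pair =>
    let pc := if some c ≠ last_pair then pair_count + 1 else pair_count
    let lp := if some c ≠ last_pair then some c else last_pair
    if pc ≥ 2 then true else pvAuxB rest pc lp

-- number of collapsed groups of the pair-letter sequence, seeded with the last counted letter
def pvG : List Char → Option Char → Nat
  | [], _ => 0
  | c :: rest, lp => if some c ≠ lp then 1 + pvG rest (some c) else pvG rest lp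

theorem pvAuxA_eq_pvAuxB (l : List (Char × Char)) :
    ∀ pc lp, pc < 2 →
      pvAuxA l pc lp = pvAuxB (l.filterMap (fun p => if p.1 = p.2 then some p.1 else none)) pc lp := by
  induction l with
  | nil => intro pc lp _; rfl
  | cons p rest ih =>
    intro pc lp h
    obtain ⟨a, b⟩ := p
    by_cases hab : a = b
    · subst hab
      by_cases hlp : some a ≠ lp
      · by_cases h2 : pc + 1 ≥ 2
        · simp [pvAuxA, pvAuxB, List.filterMap_cons, hlp, h2]
        · simp [pvAuxA, pvAuxB, List.filterMap_cons, hlp, h2, ih _ _ (show pc + 1 < 2 by omega)]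
      · simp [pvAuxA, pvAuxB, List.filterMap_cons, hlp, show ¬ pc ≥ 2 by omega, ih _ _ h]
    · simp [pvAuxA, pvAuxB, List.filterMap_cons, hab, show ¬ pc ≥ 2 by omega, ih _ _ h]

theorem pvAuxB_eq_pvG (l : List Char) :
    ∀ pc lp, pc < 2 → pvAuxB l pc lp = decide (pc + (pvG l lp : Int) ≥ 2) := by
  induction l with
  | nil => intro pc lp h; simp [pvAuxB, pvG]; omega
  | cons c rest ih =>
    intro pc lp h
    by_cases hlp : some c ≠ lp
    · by_cases h2 : pc + 1 ≥ 2
      · rw [show pvAuxB (c :: rest) pc lp = true from by simp [pvAuxB, hlp, h2],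
            eq_comm, decide_eq_true_eq]
        simp only [pvG, if_pos hlp]
        push_cast
        omega
      · rw [show pvAuxB (c :: rest) pc lp = pvAuxB rest (pc + 1) (some c) from by
              simp [pvAuxB, hlp, h2],
            ih _ _ (by omega), decide_eq_decide]
        simp only [pvG, if_pos hlp]
        push_cast
        omega
    · rw [show pvAuxB (c :: rest) pc lp = pvAuxB rest pc lp from by
            simp [pvAuxB, hlp, show ¬ pc ≥ 2 by omega],
          ih _ _ h, decide_eq_decide]
      simp only [pvG, if_neg hlp]

theorem pvG_some (rest : List Char) : ∀ c : Char,
    pvG rest (some c) = (((c :: rest).zip rest).filter (fun p => p.1 ≠ p.2)).length := by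
  induction rest with
  | nil => intro c; rfl
  | cons d rest ih =>
    intro c
    by_cases hdc : d = c
    · subst hdc
      have : ¬ (some d ≠ some d) := by simp
      simp only [pvG, if_neg this, List.zip_cons_cons, List.filter_cons]
      simp [ih]
    · have h1 : some d ≠ some c := by simp [hdc]
      have h2 : ¬ (c = d) := fun h => hdc h.symm
      simp only [pvG, if_pos h1, List.zip_cons_cons, List.filter_cons]
      simp only [ih d]
      simp [h2]
      omega

theorem pvG_none (l : List Char) :
    ((if l = [] then 0 else 1) + ((l.zip l.tail).filter (fun p => p.1 ≠ p.2)).length : Int)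
      = (pvG l none : Int) := by
  cases l with
  | nil => simp [pvG]
  | cons c rest =>
    have hne : some c ≠ (none : Option Char) := by simp
    simp only [pvG, if_pos hne, List.tail_cons, pvG_some rest c, List.cons_ne_nil, if_neg,
      reduceCtorEq]
    push_cast
    omega

-- the index loop visits exactly the adjacent pairs from position n on
theorem pvLoop_eq_pvAuxA (cs : List Char) :
    ∀ (m n : Nat) (pc : Int) (lp : Option Char), m = cs.length - 1 - n →
      check_pair_letters_loop cs (PySem.List.pyRange (n : Int) ((cs.length : Int) - 1) 1) pc lp
        = pvAuxA ((cs.zip cs.tail).drop n) pc lp := by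
  intro m
  induction m with
  | zero =>
    intro n pc lp hm
    have hge : (cs.length : Int) - 1 ≤ (n : Int) := by omega
    rw [PySem.List.pyRange_one_eq_nil hge]
    have : (cs.zip cs.tail).drop n = [] := by
      apply List.drop_eq_nil_of_le
      rw [List.length_zip, List.length_tail]
      omega
    rw [this]
    rfl
  | succ m ih =>
    intro n pc lp hm
    have hlt : (n : Int) < (cs.length : Int) - 1 := by omega
    rw [PySem.List.pyRange_one_cons hlt]
    have hn1 : n + 1 < cs.length := by omega
    have hn : n < cs.length := by omega
    have hga : PySem.List.pyGet? cs (n : Int) = some cs[n] :=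
      PySem.List.pyGet?_ofNat cs n hn
    have hgb : PySem.List.pyGet? cs ((n : Int) + 1) = some cs[n+1] := by
      have := PySem.List.pyGet?_ofNat cs (n + 1) hn1
      push_cast at this ⊢
      exact this
    have hdrop : (cs.zip cs.tail).drop n = (cs[n], cs[n+1]) :: (cs.zip cs.tail).drop (n + 1) := by
      have hzl : n < (cs.zip cs.tail).length := by
        rw [List.length_zip, List.length_tail]; omega
      rw [List.drop_eq_getElem_cons hzl]
      congr 1
      rw [List.getElem_zip]
      congr 1
      rw [List.getElem_tail]
    rw [hdrop]
    simp only [check_pair_letters_loop, hga, hgb, pvAuxA]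
    have hrec : ∀ (pc' : Int) (lp' : Option Char), pc' < 2 →
        check_pair_letters_loop cs (PySem.List.pyRange ((n : Int) + 1) ((cs.length : Int) - 1) 1) pc' lp'
          = pvAuxA ((cs.zip cs.tail).drop (n + 1)) pc' lp' := by
      intro pc' lp' _
      have := ih (n + 1) pc' lp' (by omega)
      push_cast at this
      exact this
    by_cases h2 : (if cs[n] = cs[n+1] ∧ some cs[n] ≠ lp then pc + 1 else pc) ≥ 2
    · rw [if_pos h2, if_pos h2]
    · rw [if_neg h2, if_neg h2, hrec _ _ (by split_ifs at h2 ⊢ <;> omega)]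

-- ===== VERDICT (by name: the statement is the Claim_ definition above) =====
theorem check_pair_letters_spec : Claim_equal_check_pair_letters := by
  intro s _
  unfold Spec_check_pair_letters check_pair_letters check_pair_letters_alt pvPairLetters
  have h1 := pvLoop_eq_pvAuxA s.toList (s.toList.length - 1) 0 0 none (by omega)
  simp only [Nat.cast_zero] at h1
  rw [h1, List.drop_zero, pvAuxA_eq_pvAuxB _ _ _ (by omega), pvAuxB_eq_pvG _ _ _ (by omega)]
  simp only [zero_add, ← pvG_none]
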